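-- pv_equiv track=rewrite | github.com/thomas-151/personal-python-mini-projects | Word Guessing Hangman Game/word_guessing_hangman.py | reveal_progress
-- ===== SOURCE A (Python) =====
-- def reveal_progress(word, revealed_indices):
--     display = ""
--     for i, ch in enumerate(word):
--         if i in revealed_indices:
--             display += ch + " "
--         else:
--             display += "_ "
--     return display.strip()
-- ===== SOURCE B (Python) =====
-- def reveal_progress(word, revealed_indices):
--     chars = ["_"] * len(word)
--     for idx in revealed_indices:
--         if 0 <= idx < len(word):
--             chars[idx] = word[idx]
--     return " ".join(chars)
-- ===== Notes on version B (the rewrite author's own statement) =====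
-- stated objective: alternative
-- what changed: B inverts the traversal: instead of scanning every character and testing list membership per position, it fills a '_' buffer by looping over revealed_indices and joins with spaces.
-- outside the precondition, e.g. on reveal_progress(' a', {0}): A returns '_', B returns '  _'
import Mathlib
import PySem

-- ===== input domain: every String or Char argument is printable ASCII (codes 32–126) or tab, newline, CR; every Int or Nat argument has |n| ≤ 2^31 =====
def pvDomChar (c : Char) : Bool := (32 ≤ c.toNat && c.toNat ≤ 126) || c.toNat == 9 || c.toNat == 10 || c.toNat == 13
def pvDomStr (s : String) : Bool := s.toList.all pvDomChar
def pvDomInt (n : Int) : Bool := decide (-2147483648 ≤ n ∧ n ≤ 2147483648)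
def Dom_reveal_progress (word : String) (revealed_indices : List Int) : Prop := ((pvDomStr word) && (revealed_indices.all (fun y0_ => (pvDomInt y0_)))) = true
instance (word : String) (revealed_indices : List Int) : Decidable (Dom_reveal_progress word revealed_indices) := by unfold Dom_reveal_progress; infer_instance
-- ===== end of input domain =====

-- B fills a '_' buffer from revealed_indices and joins with spaces, instead of A's per-character membership scan (alternative decomposition, same cost); equivalence proved except where a revealed edge character is whitespace.


-- ===== PORT A =====
-- built over List Char (exact: Lean's String.append is opaque; PySem.Chars.strip is Python's str.strip)
def reveal_progress (word : String) (revealed_indices : List Int) : String :=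
  let display : List Char :=
    (PySem.List.enumerate word.toList).foldl
      (fun disp p => if revealed_indices.contains p.1 then disp ++ [p.2, ' '] else disp ++ ['_', ' '])
      []
  String.mk (PySem.Chars.strip display)

-- ===== PORT B =====
-- buffer of '_' filled from revealed_indices; ' '.join of single chars = List.intersperse ' '
def reveal_progress_alt (word : String) (revealed_indices : List Int) : String :=
  let w := word.toList
  let chars : List Char :=
    revealed_indices.foldl
      (fun cs idx =>
        if 0 ≤ idx ∧ idx < (w.length : Int) then cs.set idx.toNat (w.getD idx.toNat '_') else cs)
      (List.replicate w.length '_')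
  String.mk (List.intersperse ' ' chars)

-- ===== PRECONDITION & SPEC =====
-- Pre_ excludes only inputs whose first or last word character is whitespace AND revealed, a corner
-- no hangman word reaches: there A's final strip() accidentally eats that revealed whitespace letter
-- (and its neighbouring separators), while B shows it literally — both behaviours are unspecified artefacts.
def Pre_reveal_progress (word : String) (revealed_indices : List Int) : Prop :=
  (revealed_indices.contains 0 = true →
    PySem.Chars.isspace (word.toList.headD '_') = false)
  ∧ (revealed_indices.contains ((word.toList.length : Int) - 1) = true →
    PySem.Chars.isspace (word.toList.getLastD '_') = false)
instance (word : String) (revealed_indices : List Int) : Decidable (Pre_reveal_progress word revealed_indices) := by unfold Pre_reveal_progress; infer_instance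
def pvWitness_reveal_progress : String × List Int := ("apple", [0, 2])
def Spec_reveal_progress (word : String) (revealed_indices : List Int) (out : String) : Prop := out = reveal_progress_alt word revealed_indices
instance (word : String) (revealed_indices : List Int) (out : String) : Decidable (Spec_reveal_progress word revealed_indices out) := by unfold Spec_reveal_progress; infer_instance

-- ===== CLAIM (what is proved, stated in full; the proofs are below) =====
def Claim_equal_reveal_progress : Prop := ∀ (word : String) (revealed_indices : List Int), Dom_reveal_progress word revealed_indices → Pre_reveal_progress word revealed_indices → Spec_reveal_progress word revealed_indices (reveal_progress word revealed_indices)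

-- ===== LEMMAS AND PROOFS =====

-- A's accumulation = blocks of the pointwise-masked characters
theorem foldl_blocks (rs : List Int) (l : List (Int × Char)) (acc : List Char) :
    l.foldl (fun d p => if rs.contains p.1 then d ++ [p.2, ' '] else d ++ ['_', ' ']) acc
    = acc ++ (l.map (fun p => if rs.contains p.1 then p.2 else '_')).flatMap (fun c => [c, ' ']) := by
  induction l generalizing acc with
  | nil => simp
  | cons p t ih =>
    rw [List.foldl_cons, ih, List.map_cons, List.flatMap_cons]
    by_cases h : rs.contains p.1
    · rw [if_pos h, if_pos h]; simp
    · rw [if_neg h, if_neg h]; simp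

-- B's buffer fill: length preserved, then pointwise value
theorem fill_length (w : List Char) (rs : List Int) (cs : List Char) :
    (rs.foldl
      (fun cs idx =>
        if 0 ≤ idx ∧ idx < (w.length : Int) then cs.set idx.toNat (w.getD idx.toNat '_') else cs)
      cs).length = cs.length := by
  induction rs generalizing cs with
  | nil => rfl
  | cons a t ih => rw [List.foldl_cons, ih]; split <;> simp

theorem fill_getElem? (w : List Char) (rs : List Int) (cs : List Char)
    (hlen : cs.length = w.length) (j : Nat) (hj : j < w.length) :
    (rs.foldl
      (fun cs idx =>
        if 0 ≤ idx ∧ idx < (w.length : Int) then cs.set idx.toNat (w.getD idx.toNat '_') else cs)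
      cs)[j]?
    = if rs.contains (j : Int) then some (w[j]'hj) else cs[j]? := by
  induction rs generalizing cs with
  | nil => simp
  | cons idx t ih =>
    simp only [List.foldl_cons]
    by_cases hb : 0 ≤ idx ∧ idx < (w.length : Int)
    · rw [if_pos hb]
      rw [ih _ (by rw [List.length_set]; exact hlen)]
      by_cases ht : (j : Int) ∈ t
      · simp [ht]
      · by_cases he : idx = (j : Int)
        · have hn : idx.toNat = j := by omega
          rw [hn, List.getElem?_set_self (by omega)]
          simp [he, ht, List.getD, List.getElem?_eq_getElem hj]
        · have hn : idx.toNat ≠ j := by omega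
          have he' : ¬ ((j : Int) = idx) := fun h => he h.symm
          rw [List.getElem?_set_ne hn]
          simp [ht, he']
    · rw [if_neg hb]
      rw [ih _ hlen]
      have he' : ¬ ((j : Int) = idx) := by omega
      by_cases ht : (j : Int) ∈ t <;> simp [ht, he']

-- flatMap blocks = intersperse ++ trailing space (nonempty case)
theorem flatMap_blocks_eq (m : List Char) (hm : m ≠ []) :
    m.flatMap (fun c => [c, ' ']) = List.intersperse ' ' m ++ [' '] := by
  induction m with
  | nil => simp at hm
  | cons c t ih =>
    cases t with
    | nil => simp
    | cons d t' =>
      rw [List.flatMap_cons, ih (by simp), List.intersperse_cons₂]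
      simp

theorem intersperse_ne_nil (m : List Char) (hm : m ≠ []) : List.intersperse ' ' m ≠ [] := by
  cases m with
  | nil => simp at hm
  | cons c t => cases t with
    | nil => simp
    | cons d t' => rw [List.intersperse_cons₂]; simp

theorem getLast?_cons_of_ne_nil (a : Char) (l : List Char) (hl : l ≠ []) :
    (a :: l).getLast? = l.getLast? := by
  cases l with
  | nil => simp at hl
  | cons b t => exact List.getLast?_cons_cons

theorem getLast?_intersperse (m : List Char) :
    (List.intersperse ' ' m).getLast? = m.getLast? := by
  induction m with
  | nil => simp
  | cons c t ih =>
    cases t with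
    | nil => simp
    | cons d t' =>
      rw [List.intersperse_cons₂, List.getLast?_cons_cons,
        getLast?_cons_of_ne_nil _ _ (intersperse_ne_nil _ (by simp)), ih, List.getLast?_cons_cons]

theorem dropWhile_eq_self_of_head (p : Char → Bool) (l : List Char)
    (h : ∀ a, l.head? = some a → p a = false) : l.dropWhile p = l := by
  cases l with
  | nil => rfl
  | cons a t => simp [h a rfl]

-- strip of the joined blocks = intersperse, when the edge displayed chars are non-space
theorem strip_blocks (m : List Char)
    (hhead : ∀ a, m.head? = some a → PySem.Chars.isspace a = false)
    (hlast : ∀ a, m.getLast? = some a → PySem.Chars.isspace a = false) :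
    PySem.Chars.strip (m.flatMap (fun c => [c, ' '])) = List.intersperse ' ' m := by
  cases m with
  | nil => rfl
  | cons c t =>
    rw [flatMap_blocks_eq _ (by simp)]
    unfold PySem.Chars.strip PySem.Chars.lstrip PySem.Chars.rstrip
    have hh : (List.intersperse ' ' (c :: t) ++ [' ']).head? = some c := by
      cases t with
      | nil => simp
      | cons d t' => rw [List.intersperse_cons₂]; simp
    have h1 : List.dropWhile PySem.Chars.isspace (List.intersperse ' ' (c :: t) ++ [' '])
        = List.intersperse ' ' (c :: t) ++ [' '] :=
      dropWhile_eq_self_of_head _ _ (by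
        intro a ha; rw [hh] at ha; cases ha
        exact hhead c rfl)
    rw [h1, List.reverse_append, List.reverse_singleton, List.singleton_append,
      List.dropWhile_cons]
    have hsp : PySem.Chars.isspace ' ' = true := by decide
    rw [hsp]; simp only [if_pos]
    have h2 : List.dropWhile PySem.Chars.isspace (List.intersperse ' ' (c :: t)).reverse
        = (List.intersperse ' ' (c :: t)).reverse :=
      dropWhile_eq_self_of_head _ _ (by
        intro a ha
        rw [List.head?_reverse, getLast?_intersperse] at ha
        exact hlast a ha)
    rw [h2, List.reverse_reverse]

-- the common pointwise description
theorem alt_chars_eq (w : List Char) (rs : List Int) :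
    (rs.foldl
      (fun cs idx =>
        if 0 ≤ idx ∧ idx < (w.length : Int) then cs.set idx.toNat (w.getD idx.toNat '_') else cs)
      (List.replicate w.length '_'))
    = (PySem.List.enumerate w).map (fun p => if rs.contains p.1 then p.2 else '_') := by
  apply List.ext_getElem?
  intro j
  by_cases hj : j < w.length
  · rw [fill_getElem? w rs _ (by simp) j hj]
    rw [List.getElem?_map, PySem.List.getElem?_enumerate,
      List.getElem?_eq_getElem hj]
    rw [List.getElem?_replicate, if_pos hj]
    split <;> simp_all
  · rw [List.getElem?_eq_none (by rw [fill_length]; simp; omega),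
      List.getElem?_eq_none (by simp [PySem.List.length_enumerate]; omega)]

-- ===== VERDICT (by name: the statement is the Claim_ definition above) =====
theorem reveal_progress_spec : Claim_equal_reveal_progress := by
  intro word revealed_indices _hdom hpre
  obtain ⟨hp0, hpl⟩ := hpre
  unfold Spec_reveal_progress reveal_progress reveal_progress_alt
  dsimp only
  rw [alt_chars_eq]
  congr 1
  rw [foldl_blocks revealed_indices (PySem.List.enumerate word.toList) [], List.nil_append]
  apply strip_blocks
  · intro a ha
    rw [List.head?_map] at ha
    cases hw : word.toList with
    | nil => rw [hw] at ha; simp [PySem.List.enumerate] at ha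
    | cons c t =>
      rw [hw, PySem.List.enumerate_cons] at ha
      simp only [Option.map_some, List.head?_cons, Option.some.injEq] at ha
      subst ha
      by_cases hb : revealed_indices.contains (0 : Int)
      · simp only [hb, if_pos]
        have := hp0 hb
        rw [hw] at this
        simpa using this
      · rw [if_neg hb]; decide
  · intro a ha
    rw [List.getLast?_eq_getElem?] at ha
    by_cases hw : word.toList = []
    · rw [hw] at ha; simp [PySem.List.enumerate] at ha
    · have hlen : 0 < word.toList.length := List.length_pos_of_ne_nil hw
      have hlm : (List.map (fun p => if revealed_indices.contains p.1 = true then p.2 else '_')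
          (PySem.List.enumerate word.toList)).length = word.toList.length := by
        simp [PySem.List.length_enumerate]
      rw [hlm, List.getElem?_map, PySem.List.getElem?_enumerate,
        List.getElem?_eq_getElem (by omega : word.toList.length - 1 < word.toList.length)] at ha
      simp only [Option.map_some, Option.some.injEq] at ha
      subst ha
      by_cases hb : revealed_indices.contains ((0 : Int) + ↑(word.toList.length - 1))
      · simp only [hb, if_pos]
        have hb' : revealed_indices.contains ((word.toList.length : Int) - 1) = true := by
          have : (0 : Int) + ↑(word.toList.length - 1) = (word.toList.length : Int) - 1 := by omega
          rwa [this] at hb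
        have := hpl hb'
        rw [List.getLastD_eq_getLast?, List.getLast?_eq_getElem?,
          List.getElem?_eq_getElem (by omega : word.toList.length - 1 < word.toList.length)] at this
        simpa using this
      · rw [if_neg hb]; decide
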